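-- pv_equiv track=rewrite | github.com/aitorzaldua/CodeWars | 7kyu_countTheDigit.py | nb_dig
-- ===== SOURCE A (Python) =====
-- def nb_dig(n, d):
--     my_range = range (0, n+1)
--     list_square = []
--
--     print (my_range)
--
--     for k in my_range:
--
--         square = k**2
--         list_square.append (square)
--
--     joinDigits = ''.join(map(str,list_square))
--
--     count = 0
--
--     for x in joinDigits:
--
--         if x == str(d):
--             count = count +1
--
--     print (list_square)
--     print (joinDigits)
--
--     return (count)
-- ===== SOURCE B (Python) =====
-- def nb_dig(n, d):
--     # Counts digit d in the squares 0..n by integer arithmetic (no string building).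
--     # Unlike A it prints nothing; return value is identical.
--     count = 0
--     for k in range(n + 1):
--         s = k * k
--         if s == 0:
--             if d == 0:
--                 count += 1
--         else:
--             while s > 0:
--                 if s % 10 == d:
--                     count += 1
--                 s //= 10
--     return count
-- ===== Notes on version B (the rewrite author's own statement) =====
-- stated objective: idiomatic
-- what changed: B drops A's square-list, string join and character scan entirely: it peels the digits of each square arithmetically (s % 10, s //= 10) in a single accumulator loop, with no intermediate list or string and no printing.
import Mathlib
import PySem

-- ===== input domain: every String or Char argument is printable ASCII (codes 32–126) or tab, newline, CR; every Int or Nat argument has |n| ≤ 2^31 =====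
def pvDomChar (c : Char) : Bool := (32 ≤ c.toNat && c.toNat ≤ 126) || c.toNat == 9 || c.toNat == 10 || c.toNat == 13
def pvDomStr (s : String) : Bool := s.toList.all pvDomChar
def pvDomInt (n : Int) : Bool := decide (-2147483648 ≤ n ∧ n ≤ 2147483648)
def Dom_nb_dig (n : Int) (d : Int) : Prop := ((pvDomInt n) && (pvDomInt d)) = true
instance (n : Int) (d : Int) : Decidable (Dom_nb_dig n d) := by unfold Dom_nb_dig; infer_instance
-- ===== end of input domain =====

-- B replaces A's square-list + string-join + character scan by one arithmetic
-- digit-peeling loop per square (idiomatic; A also prints to stdout, B does not;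
-- the equivalence proved is about the return value).


-- ===== PORT A =====
-- A: build list of squares, join their str()s, count characters equal to str(d).
def nb_dig (n : Int) (d : Int) : Int :=
  let my_range := PySem.List.pyRange 0 (n + 1) 1
  let list_square := my_range.foldl (fun acc k => acc ++ [k * k]) []
  let joinDigits := list_square.foldl (fun acc s => acc ++ PySem.Int.toChars s) ([] : List Char)
  joinDigits.foldl (fun count x => if [x] = PySem.Int.toChars d then count + 1 else count) 0

-- ===== PORT B =====
-- B's inner while-loop over s > 0; s = k*k ≥ 0, so Nat % and / are exactly Python's % and // here.
def pvDigits (s : Nat) (d : Int) : Int :=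
  if h : s = 0 then 0
  else (if ((s % 10 : Nat) : Int) = d then 1 else 0) + pvDigits (s / 10) d
termination_by s
decreasing_by exact Nat.div_lt_self (Nat.pos_of_ne_zero h) (by norm_num)

def nb_dig_alt (n : Int) (d : Int) : Int :=
  (PySem.List.pyRange 0 (n + 1) 1).foldl
    (fun count k =>
      let s := k * k
      if s = 0 then (if d = 0 then count + 1 else count)
      else count + pvDigits s.toNat d) 0

-- ===== PRECONDITION & SPEC =====
def Spec_nb_dig (n : Int) (d : Int) (out : Int) : Prop := out = nb_dig_alt n d
instance (n : Int) (d : Int) (out : Int) : Decidable (Spec_nb_dig n d out) := by unfold Spec_nb_dig; infer_instance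

-- ===== CLAIM (what is proved, stated in full; the proofs are below) =====
def Claim_equal_nb_dig : Prop := ∀ (n : Int) (d : Int), Dom_nb_dig n d → Spec_nb_dig n d (nb_dig n d)

-- ===== LEMMAS AND PROOFS =====

-- decimal representation of a Nat, structured for induction
def pvRep (m : Nat) : List Char :=
  if m < 10 then [Nat.digitChar m]
  else pvRep (m / 10) ++ [Nat.digitChar (m % 10)]
termination_by m
decreasing_by exact Nat.div_lt_self (by omega) (by norm_num)

lemma pvRep_small {m : Nat} (h : m < 10) : pvRep m = [Nat.digitChar m] := by
  rw [pvRep]; simp [h]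

lemma pvRep_big {m : Nat} (h : 10 ≤ m) :
    pvRep m = pvRep (m / 10) ++ [Nat.digitChar (m % 10)] := by
  rw [pvRep]; simp [Nat.not_lt.mpr h]

lemma toDigitsCore_eq (f : Nat) : ∀ (m : Nat) (acc : List Char), m ≤ f →
    Nat.toDigitsCore 10 (f + 1) m acc = pvRep m ++ acc := by
  induction f with
  | zero =>
    intro m acc hm
    have : m = 0 := by omega
    subst this
    simp [Nat.toDigitsCore, pvRep_small (by norm_num : (0:Nat) < 10)]
  | succ f ih =>
    intro m acc hm
    show (if m / 10 = 0 then Nat.digitChar (m % 10) :: acc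
          else Nat.toDigitsCore 10 (f + 1) (m / 10) (Nat.digitChar (m % 10) :: acc)) = _
    by_cases h : m / 10 = 0
    · have hm10 : m < 10 := by omega
      rw [pvRep_small hm10, Nat.mod_eq_of_lt hm10]
      simp [h]
    · have h10 : 10 ≤ m := by by_contra hc; exact h (by omega)
      rw [if_neg h, ih (m / 10) _ (by omega), pvRep_big h10]
      simp

lemma toDigits_eq_pvRep (m : Nat) : Nat.toDigits 10 m = pvRep m := by
  simpa [Nat.toDigits] using toDigitsCore_eq m m [] le_rfl

lemma digitChar_inj {a b : Nat} (ha : a < 10) (hb : b < 10) :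
    Nat.digitChar a = Nat.digitChar b ↔ a = b := by
  interval_cases a <;> interval_cases b <;> simp [Nat.digitChar]

lemma pvRep_length_pos (m : Nat) : 0 < (pvRep m).length := by
  by_cases h : m < 10
  · rw [pvRep_small h]; simp
  · rw [pvRep_big (by omega)]; simp

-- when d is not a single decimal digit, str(d) has ≥ 2 chars, so A never counts
lemma toChars_not_single {d : Int} (h : d < 0 ∨ 10 ≤ d) (x : Char) :
    ¬ ([x] = PySem.Int.toChars d) := by
  intro hx
  rcases h with h | h
  · have hform : PySem.Int.toChars d = '-' :: pvRep d.natAbs := by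
      simp [PySem.Int.toChars, h, toDigits_eq_pvRep]
    rw [hform] at hx
    have hnil : pvRep d.natAbs = [] := (List.cons.injEq _ _ _ _ ▸ hx).2.symm
    have := pvRep_length_pos d.natAbs
    rw [hnil] at this; simp at this
  · have hd0 : ¬ d < 0 := by omega
    have h10 : 10 ≤ d.toNat := by omega
    have hform : PySem.Int.toChars d = pvRep (d.toNat / 10) ++ [Nat.digitChar (d.toNat % 10)] := by
      simp [PySem.Int.toChars, hd0, toDigits_eq_pvRep, pvRep_big h10]
    rw [hform] at hx
    have hlen := congrArg List.length hx
    have := pvRep_length_pos (d.toNat / 10)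
    simp only [List.length_cons, List.length_append, List.length_nil] at hlen
    omega

lemma pvDigits_out {d : Int} (h : d < 0 ∨ 10 ≤ d) (m : Nat) : pvDigits m d = 0 := by
  induction m using Nat.strong_induction_on with
  | _ m ih =>
    rw [pvDigits]
    by_cases hm : m = 0
    · simp [hm]
    · have hne : ¬ (((m % 10 : Nat) : Int) = d) := by
        have h1 : m % 10 < 10 := Nat.mod_lt _ (by norm_num)
        omega
      rw [dif_neg hm, if_neg hne, ih (m / 10) (Nat.div_lt_self (Nat.pos_of_ne_zero hm) (by norm_num))]
      ring

lemma toChars_digit {d : Int} (h0 : 0 ≤ d) (h9 : d < 10) :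
    PySem.Int.toChars d = [Nat.digitChar d.toNat] := by
  have hd0 : ¬ d < 0 := by omega
  simp [PySem.Int.toChars, hd0, toDigits_eq_pvRep, pvRep_small (show d.toNat < 10 by omega)]

-- the heart: counting char str(d) in str(m) equals B's arithmetic digit count
lemma countRep (d : Int) (m : Nat) :
    (((pvRep m).countP (fun x => decide ([x] = PySem.Int.toChars d)) : Nat) : Int)
      = if m = 0 then (if d = 0 then 1 else 0) else pvDigits m d := by
  by_cases hd : 0 ≤ d ∧ d < 10
  · obtain ⟨h0, h9⟩ := hd
    rw [toChars_digit h0 h9]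
    induction m using Nat.strong_induction_on with
    | _ m ih =>
      by_cases hm : m < 10
      · rw [pvRep_small hm]
        by_cases hz : m = 0
        · subst hz
          by_cases hdz : d = 0
          · subst hdz; simp
          · have : Nat.digitChar 0 ≠ Nat.digitChar d.toNat := by
              rw [ne_eq, digitChar_inj (by norm_num) (by omega)]; omega
            simp [this, hdz]
        · rw [if_neg hz, pvDigits, dif_neg hz,
              Nat.mod_eq_of_lt hm, Nat.div_eq_of_lt hm, pvDigits]
          by_cases he : (m : Int) = d
          · have : Nat.digitChar m = Nat.digitChar d.toNat := by
              rw [digitChar_inj hm (by omega)]; omega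
            simp [this, he]
          · have : Nat.digitChar m ≠ Nat.digitChar d.toNat := by
              rw [ne_eq, digitChar_inj hm (by omega)]; omega
            simp [this, he]
      · have h10 : 10 ≤ m := by omega
        have hq : m / 10 ≠ 0 := by
          intro hc; omega
        rw [pvRep_big h10, List.countP_append, if_neg (by omega : ¬ m = 0),
            pvDigits, dif_neg (by omega : ¬ m = 0)]
        have ihq := ih (m / 10) (Nat.div_lt_self (by omega) (by norm_num))
        rw [if_neg hq] at ihq
        push_cast
        rw [ihq]
        by_cases he : ((m % 10 : Nat) : Int) = d
        · have : Nat.digitChar (m % 10) = Nat.digitChar d.toNat := by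
            rw [digitChar_inj (Nat.mod_lt _ (by norm_num)) (by omega)]; omega
          have he2 : (m : Int) % 10 = d := by omega
          simp [this, he2]; ring
        · have : Nat.digitChar (m % 10) ≠ Nat.digitChar d.toNat := by
            rw [ne_eq, digitChar_inj (Nat.mod_lt _ (by norm_num)) (by omega)]; omega
          have he2 : ¬ ((m : Int) % 10 = d) := by omega
          simp [this, he2]
  · have hout : d < 0 ∨ 10 ≤ d := by omega
    have hp : ∀ x ∈ pvRep m, (fun x => decide ([x] = PySem.Int.toChars d)) x = false := by
      intro x _; simp [toChars_not_single hout x]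
    rw [List.countP_eq_zero.mpr (by intro x hx; simpa using hp x hx)]
    rw [pvDigits_out hout]
    have : d ≠ 0 := by omega
    by_cases hm : m = 0 <;> simp [hm, this]

-- per square: A's character count of str(k*k) = B's contribution for k
lemma perElem (d k : Int) (_hk : 0 ≤ k) :
    (((PySem.Int.toChars (k * k)).countP (fun x => decide ([x] = PySem.Int.toChars d)) : Nat) : Int)
      = if k * k = 0 then (if d = 0 then 1 else 0) else pvDigits (k * k).toNat d := by
  have hs : ¬ (k * k < 0) := by nlinarith
  have htc : PySem.Int.toChars (k * k) = pvRep (k * k).toNat := by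
    simp [PySem.Int.toChars, hs, toDigits_eq_pvRep]
  rw [htc, countRep]
  have : (k * k).toNat = 0 ↔ k * k = 0 := by omega
  by_cases hz : k * k = 0 <;> simp [hz, this]

-- B's fold equals the character count over the concatenation of the str(k*k)
lemma fold_eq (d : Int) (xs : List Int) (h : ∀ k ∈ xs, 0 ≤ k) : ∀ (c : Int),
    xs.foldl (fun count k =>
        if k * k = 0 then (if d = 0 then count + 1 else count)
        else count + pvDigits (k * k).toNat d) c
      = c + (((xs.flatMap (fun k => PySem.Int.toChars (k * k))).countP
          (fun x => decide ([x] = PySem.Int.toChars d)) : Nat) : Int) := by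
  induction xs with
  | nil => intro c; simp
  | cons y ys ih =>
    intro c
    have hy : 0 ≤ y := h y (by simp)
    have ih' := ih (fun k hk => h k (List.mem_cons_of_mem _ hk))
    simp only [List.foldl_cons, List.flatMap_cons, List.countP_append]
    rw [ih']
    have hpe := perElem d y hy
    by_cases hz : y * y = 0
    · rw [if_pos hz]
      rw [if_pos hz] at hpe
      by_cases hdz : d = 0 <;> simp [hdz] at hpe ⊢ <;> omega
    · rw [if_neg hz]
      rw [if_neg hz] at hpe
      push_cast
      omega

-- A's character-scanning fold is an Int-valued countP
lemma a_count_fold (d : Int) (cs : List Char) (c : Int) :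
    cs.foldl (fun count x => if [x] = PySem.Int.toChars d then count + 1 else count) c
      = c + ((cs.countP (fun x => decide ([x] = PySem.Int.toChars d)) : Nat) : Int) := by
  have := PySem.List.foldl_count_if (fun x => decide ([x] = PySem.Int.toChars d)) cs c
  simpa using this

-- ===== VERDICT (by name: the statement is the Claim_ definition above) =====
theorem nb_dig_spec : Claim_equal_nb_dig := by
  intro n d _
  unfold Spec_nb_dig nb_dig nb_dig_alt
  simp only []
  rw [PySem.List.foldl_append_singleton_eq_map, List.nil_append,
      PySem.List.foldl_append_eq_flatMap, List.nil_append,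
      List.flatMap_map, a_count_fold]
  rw [fold_eq d _ (fun k hk => (PySem.List.mem_pyRange_one.mp hk).1) 0]
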